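-- pv_equiv track=rewrite | github.com/strawberry-p/terminal-plotter | termgraph-calc.py | multisplit
-- ===== SOURCE A (Python) =====
-- def multisplit(string,splitters=["+","-"]):
--     res = []
--     current = splitters[0]
--     currentPos = 0
--     i = 0
--     for l in string:
--         if l in splitters:
--             res.append((current,string[currentPos:i]))
--             current = l
--             currentPos = i+1 #avoids including the splitter
--         i += 1
--     res.append((current,string[currentPos:]))
--     return res
-- ===== SOURCE B (Python) =====
-- def multisplit(string, splitters=["+", "-"]):
--     # Iterate on the shrinking remainder: find the first splitter in it,
--     # emit the segment before it, and continue with the slice after it.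
--     res = []
--     current = splitters[0]
--     rest = string
--     while True:
--         j = next((k for k, ch in enumerate(rest) if ch in splitters), -1)
--         if j < 0:
--             res.append((current, rest))
--             return res
--         res.append((current, rest[:j]))
--         current = rest[j]
--         rest = rest[j + 1:]
-- ===== Notes on version B (the rewrite author's own statement) =====
-- stated objective: alternative
-- what changed: Replaces A's single stateful index-tracking scan over all characters with a find-first-splitter decomposition on the shrinking remainder: locate the next splitter, emit the slice before it, and continue with the slice after it (no global indices, no running position state).
-- outside the precondition, e.g. on multisplit('a+b', []): A raises IndexError, B raises IndexError
import Mathlib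
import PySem

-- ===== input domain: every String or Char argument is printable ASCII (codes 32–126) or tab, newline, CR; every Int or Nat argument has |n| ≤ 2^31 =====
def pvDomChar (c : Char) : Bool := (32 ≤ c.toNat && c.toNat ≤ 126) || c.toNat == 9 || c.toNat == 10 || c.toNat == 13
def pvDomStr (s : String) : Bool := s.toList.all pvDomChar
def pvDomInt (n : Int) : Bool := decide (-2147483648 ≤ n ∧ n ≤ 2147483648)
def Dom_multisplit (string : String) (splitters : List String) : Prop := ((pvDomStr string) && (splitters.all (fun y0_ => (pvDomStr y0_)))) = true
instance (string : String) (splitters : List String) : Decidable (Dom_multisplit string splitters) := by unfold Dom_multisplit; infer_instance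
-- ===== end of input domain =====

-- B replaces A's single stateful index-tracking scan with a find-first-splitter loop on the shrinking remainder; alternative decomposition, same cost.


-- ===== PORT A =====
-- literal port: one scan, state (res, current, currentPos, i); 'l in splitters' is equality of the 1-char string with a splitter
def multisplit (string : String) (splitters : List String) : List (String × String) :=
  let fin := string.toList.foldl (fun st l =>
      let (res, current, currentPos, i) := st
      if splitters.contains (String.singleton l) then
        (res ++ [(current, PySem.Str.slice string (some currentPos) (some i))],
         String.singleton l, i + 1, i + 1)
      else (res, current, currentPos, i + 1))
    (([] : List (String × String)), splitters.headD "", (0 : Int), (0 : Int))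
  fin.1 ++ [(fin.2.1, PySem.Str.slice string (some fin.2.2.1) none)]

-- ===== PORT B =====
-- Source B's inner enumerate loop: locate the first splitter, returning (rest[:j], rest[j], rest[j+1:])
def msFind (splitters : List String) : List Char → Option (List Char × Char × List Char)
  | [] => none
  | c :: t =>
      if splitters.contains (String.singleton c) then some ([], c, t)
      else match msFind splitters t with
        | none => none
        | some (pre, ch, post) => some (c :: pre, ch, post)

-- termination measure for msGo (cited by decreasing_by)
lemma msFind_post_length (splitters : List String) :
    ∀ (rest pre post : List Char) (ch : Char),
      msFind splitters rest = some (pre, ch, post) → post.length < rest.length := by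
  intro rest
  induction rest with
  | nil => intro pre post ch h; simp [msFind] at h
  | cons c t ih =>
      intro pre post ch h
      by_cases hc : String.singleton c ∈ splitters
      · simp [msFind, hc] at h
        obtain ⟨_, _, h3⟩ := h
        subst h3; simp
      · cases hf : msFind splitters t with
        | none => simp [msFind, hc, hf] at h
        | some pcp =>
            obtain ⟨pre', ch', post'⟩ := pcp
            simp [msFind, hc, hf] at h
            obtain ⟨_, _, h3⟩ := h
            subst h3
            exact Nat.lt_succ_of_lt (ih _ _ _ hf)

-- Source B's go: emit the segment before the first splitter and recurse on the remainder
def msGo (splitters : List String) (current : String) (rest : List Char) :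
    List (String × String) :=
  match h : msFind splitters rest with
  | none => [(current, String.ofList rest)]
  | some (pre, ch, post) =>
      (current, String.ofList pre) :: msGo splitters (String.singleton ch) post
termination_by rest.length
decreasing_by exact msFind_post_length splitters rest pre post ch h

def multisplit_alt (string : String) (splitters : List String) : List (String × String) :=
  msGo splitters (splitters.headD "") string.toList

-- ===== PRECONDITION & SPEC =====
-- Pre_ excludes only splitters = [], where the Python A (and B) raise IndexError on splitters[0]
def Pre_multisplit (string : String) (splitters : List String) : Prop := splitters ≠ []
instance (string : String) (splitters : List String) : Decidable (Pre_multisplit string splitters) := by unfold Pre_multisplit; infer_instance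
def pvWitness_multisplit : String × List String := ("a+b-c", ["+", "-"])
def Spec_multisplit (string : String) (splitters : List String) (out : List (String × String)) : Prop := out = multisplit_alt string splitters
instance (string : String) (splitters : List String) (out : List (String × String)) : Decidable (Spec_multisplit string splitters out) := by unfold Spec_multisplit; infer_instance

-- ===== CLAIM (what is proved, stated in full; the proofs are below) =====
def Claim_equal_multisplit : Prop := ∀ (string : String) (splitters : List String), Dom_multisplit string splitters → Pre_multisplit string splitters → Spec_multisplit string splitters (multisplit string splitters)

-- ===== LEMMAS AND PROOFS =====

-- proof-side name for A's scan continued from state st, with the final tail appended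
def msGoA (string : String) (splitters : List String)
    (st : List (String × String) × String × Int × Int) (t : List Char) : List (String × String) :=
  let fin := t.foldl (fun st l =>
      let (res, current, currentPos, j) := st
      if splitters.contains (String.singleton l) then
        (res ++ [(current, PySem.Str.slice string (some currentPos) (some j))],
         String.singleton l, j + 1, j + 1)
      else (res, current, currentPos, j + 1)) st
  fin.1 ++ [(fin.2.1, PySem.Str.slice string (some fin.2.2.1) none)]

lemma msGoA_nil (string : String) (splitters : List String) (st) :
    msGoA string splitters st [] = st.1 ++ [(st.2.1, PySem.Str.slice string (some st.2.2.1) none)] := rfl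

lemma msGoA_cons (string : String) (splitters : List String) (acc cur prev i c t) :
    msGoA string splitters (acc, cur, prev, i) (c :: t) =
      if String.singleton c ∈ splitters then
        msGoA string splitters
          (acc ++ [(cur, PySem.Str.slice string (some prev) (some i))], String.singleton c, i + 1, i + 1) t
      else msGoA string splitters (acc, cur, prev, i + 1) t := by
  by_cases h : String.singleton c ∈ splitters <;> simp [msGoA, h]

lemma msFind_none_of_clean (splitters : List String) :
    ∀ (seg : List Char), (∀ c ∈ seg, String.singleton c ∉ splitters) →
      msFind splitters seg = none := by
  intro seg
  induction seg with
  | nil => intro _; rfl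
  | cons c t ih =>
      intro h
      have hc := h c (by simp)
      simp [msFind, hc, ih (fun d hd => h d (by simp [hd]))]

lemma msFind_first (splitters : List String) :
    ∀ (seg : List Char) (c : Char) (t : List Char),
      (∀ d ∈ seg, String.singleton d ∉ splitters) →
      String.singleton c ∈ splitters →
      msFind splitters (seg ++ c :: t) = some (seg, c, t) := by
  intro seg
  induction seg with
  | nil => intro c t _ hc; simp [msFind, hc]
  | cons d s ih =>
      intro c t h hc
      have hd := h d (by simp)
      simp [msFind, hd, ih c t (fun e he => h e (by simp [he])) hc]

lemma msGo_of_none (splitters : List String) (cur : String) (rest : List Char)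
    (h : msFind splitters rest = none) :
    msGo splitters cur rest = [(cur, String.ofList rest)] := by
  rw [msGo]; split <;> simp_all

lemma msGo_of_some (splitters : List String) (cur : String) (rest pre post : List Char) (ch : Char)
    (h : msFind splitters rest = some (pre, ch, post)) :
    msGo splitters cur rest = (cur, String.ofList pre) :: msGo splitters (String.singleton ch) post := by
  rw [msGo]; split <;> simp_all

-- slice bridges: a slice of `string` equals the String.ofList of the corresponding chars
lemma slice_from_eq_mk (string : String) (p : Nat) (seg : List Char)
    (h : string.toList.drop p = seg) :
    PySem.Str.slice string (some (p : Int)) none = String.ofList seg := by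
  have h1 : (PySem.Str.slice string (some (p : Int)) none).toList = seg := by
    rw [PySem.Str.toList_slice, PySem.Chars.slice_eq_listSlice, PySem.List.slice_from_natCast, h]
  calc PySem.Str.slice string (some (p : Int)) none
      = String.ofList (PySem.Str.slice string (some (p : Int)) none).toList := by
        rw [String.ofList_toList]
    _ = String.ofList seg := by rw [h1]

lemma slice_between_eq_mk (string : String) (p : Nat) (seg t : List Char)
    (h : string.toList.drop p = seg ++ t) :
    PySem.Str.slice string (some (p : Int)) (some ((p + seg.length : Nat) : Int)) = String.ofList seg := by
  have h1 : (PySem.Str.slice string (some (p : Int)) (some ((p + seg.length : Nat) : Int))).toList = seg := by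
    rw [PySem.Str.toList_slice, PySem.Chars.slice_eq_listSlice,
      show ((p + seg.length : Nat) : Int) = (p : Int) + (seg.length : Int) by push_cast; ring,
      PySem.List.slice_natCast_add, h, List.take_left]
  calc PySem.Str.slice string (some (p : Int)) (some ((p + seg.length : Nat) : Int))
      = String.ofList (PySem.Str.slice string (some (p : Int)) (some ((p + seg.length : Nat) : Int))).toList := by
        rw [String.ofList_toList]
    _ = String.ofList seg := by rw [h1]

-- A's scan over the suffix t of string at index p + |seg| (seg = the pending clean segment)
-- equals acc ++ B's recursion on seg ++ t.
lemma multisplit_key (string : String) (splitters : List String) :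
    ∀ (t seg : List Char) (p : Nat) (acc : List (String × String)) (cur : String),
      string.toList.drop p = seg ++ t →
      (∀ c ∈ seg, String.singleton c ∉ splitters) →
      msGoA string splitters (acc, cur, (p : Int), ((p + seg.length : Nat) : Int)) t
        = acc ++ msGo splitters cur (seg ++ t) := by
  intro t
  induction t with
  | nil =>
      intro seg p acc cur hdrop hclean
      simp only [List.append_nil] at hdrop ⊢
      rw [msGoA_nil]
      dsimp only
      rw [msGo_of_none splitters cur seg (msFind_none_of_clean splitters seg hclean),
        slice_from_eq_mk string p seg hdrop]
  | cons c t ih =>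
      intro seg p acc cur hdrop hclean
      rw [msGoA_cons]
      by_cases hc : String.singleton c ∈ splitters
      · rw [if_pos hc]
        have hdrop2 : string.toList.drop (p + seg.length + 1) = t := by
          have := congrArg (List.drop (seg.length + 1)) hdrop
          rw [List.drop_drop] at this
          simpa [Nat.add_comm, Nat.add_assoc, Nat.add_left_comm] using this
        have hstep := ih [] (p + seg.length + 1)
          (acc ++ [(cur, PySem.Str.slice string (some (p : Int)) (some ((p + seg.length : Nat) : Int)))])
          (String.singleton c) (by simpa using hdrop2) (by simp)
        have hcast : (((p + seg.length : Nat) : Int) + 1) = (((p + seg.length + 1 : Nat)) : Int) := by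
          push_cast; ring
        simp only [List.length_nil, Nat.add_zero] at hstep
        rw [hcast, hstep]
        rw [msGo_of_some splitters cur (seg ++ c :: t) seg t c
          (msFind_first splitters seg c t hclean hc)]
        rw [slice_between_eq_mk string p seg (c :: t) hdrop]
        simp
      · rw [if_neg hc]
        have hstep := ih (seg ++ [c]) p acc cur (by simpa using hdrop)
          (by intro d hd
              rcases List.mem_append.mp hd with h1 | h1
              · exact hclean d h1
              · simp at h1; subst h1; exact hc)
        have hcast : (((p + seg.length : Nat) : Int) + 1) = (((p + (seg ++ [c]).length : Nat)) : Int) := by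
          simp
          push_cast
          ring
        rw [hcast, hstep]
        simp

-- ===== VERDICT (by name: the statement is the Claim_ definition above) =====
theorem multisplit_spec : Claim_equal_multisplit := by
  intro string splitters _ _
  unfold Spec_multisplit multisplit multisplit_alt
  have := multisplit_key string splitters string.toList [] 0 [] (splitters.headD "")
    (by simp) (by simp)
  simpa [msGoA] using this
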